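-- pv_equiv track=rewrite | github.com/cxxxxxxhh/GD-test | tmp/CardGame.py | is_bomb
-- ===== SOURCE A (Python) =====
-- def is_bomb(carddict, current_rank):
--     sum = 0
--     for card in carddict:
--         sum += carddict[card]
--     if sum >= 4:
--         allbombcard = []
--         wildcard = 'H'+current_rank
--         for card in carddict:
--             allbombcard += [card]*carddict[card]
--             bombcard = [card for card in allbombcard if card != wildcard]
--         if all(card[1] == bombcard[0][1] for card in bombcard):
--             return True
--     return False
-- ===== SOURCE B (Python) =====
-- def is_bomb(carddict, current_rank):
--     total = sum(carddict.values())
--     if total < 4: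
--         return False
--     wildcard = 'H' + current_rank
--     first_rank = None
--     for card, cnt in carddict.items():
--         if cnt > 0 and card != wildcard:
--             rank = card[1]
--             if first_rank is None:
--                 first_rank = rank
--             elif rank != first_rank:
--                 return False
--     return True
-- ===== Notes on version B (the rewrite author's own statement) =====
-- stated objective: faster
-- what changed: Instead of expanding the dict into a multiset list of cards (re-filtering it on every loop iteration) and scanning it against its first element, B makes one early-exit pass over the items, comparing each positive-count non-wildcard card's rank to the first one seen.
-- outside the precondition, e.g. on is_bomb({'S3': 2, 'D4': 2, 'x': 1}, '9'): A returns False, B returns False; on is_bomb({'x': 4}, '9'): A raises IndexError, B raises IndexError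
import Mathlib
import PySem

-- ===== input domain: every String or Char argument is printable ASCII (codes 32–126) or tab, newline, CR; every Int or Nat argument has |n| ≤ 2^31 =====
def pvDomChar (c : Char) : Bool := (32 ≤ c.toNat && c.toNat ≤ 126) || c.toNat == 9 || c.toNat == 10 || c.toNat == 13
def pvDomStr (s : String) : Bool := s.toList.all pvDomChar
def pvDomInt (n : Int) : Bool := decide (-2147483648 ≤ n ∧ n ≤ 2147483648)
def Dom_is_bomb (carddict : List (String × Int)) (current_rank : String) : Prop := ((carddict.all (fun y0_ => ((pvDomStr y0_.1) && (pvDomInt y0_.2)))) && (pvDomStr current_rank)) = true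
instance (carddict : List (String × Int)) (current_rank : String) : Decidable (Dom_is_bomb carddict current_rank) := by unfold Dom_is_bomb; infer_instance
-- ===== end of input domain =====

-- B replaces A's expanded multiset list (whose filtered copy is rebuilt on every loop
-- iteration) by one early-exit pass over the dict items comparing each rank to the first.
-- The dict argument is ported as its item list; a Python dict never repeats a key, so
-- reading the pair's value is exact for `carddict[card]`.

-- ===== PORT A =====
-- loop body of A's second `for card in carddict` loop: extend allbombcard by
-- [card]*carddict[card] ([x]*n is empty for n ≤ 0, hence Int.toNat) and recompute
-- bombcard = [card for card in allbombcard if card != wildcard]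
def bombStep (wildcard : String) (acc : List String × List String) (kv : String × Int) :
    List String × List String :=
  let a' := acc.1 ++ List.replicate kv.2.toNat kv.1
  (a', a'.filter (fun c => c != wildcard))

def is_bomb (carddict : List (String × Int)) (current_rank : String) : Bool :=
  let s : Int := carddict.foldl (fun acc kv => acc + kv.2) 0
  if 4 ≤ s then
    let wildcard := "H" ++ current_rank
    let st := carddict.foldl (bombStep wildcard) ([], [])
    let bombcard := st.2
    -- all(card[1] == bombcard[0][1] for card in bombcard): empty generator is True and
    -- never indexes bombcard[0]; card[1] is Str.pyGet? (some _ inside Pre_)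
    match bombcard with
    | [] => true
    | b0 :: _ => bombcard.all (fun c => PySem.Str.pyGet? c 1 == PySem.Str.pyGet? b0 1)
  else false

-- ===== PORT B =====
-- Source B's for-loop with its early `return False`; first_rank starts as Python None,
-- so the state is an Option around the rank (card[1] is Str.pyGet?, some _ inside Pre_)
def altLoop (wildcard : String) (first : Option (Option Char)) :
    List (String × Int) → Bool
  | [] => true
  | kv :: t =>
    if 0 < kv.2 ∧ kv.1 ≠ wildcard then
      let rank := PySem.Str.pyGet? kv.1 1
      match first with
      | none => altLoop wildcard (some rank) t
      | some r => if rank ≠ r then false else altLoop wildcard first t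
    else altLoop wildcard first t

def is_bomb_alt (carddict : List (String × Int)) (current_rank : String) : Bool :=
  let total : Int := carddict.foldl (fun acc kv => acc + kv.2) 0
  if total < 4 then false
  else altLoop ("H" ++ current_rank) none carddict

-- ===== PRECONDITION & SPEC =====
-- Pre_ restricts to the natural domain of well-formed cards: it excludes exactly the
-- inputs where, with the counts summing to ≥ 4, some card with positive count other than
-- the wildcard is shorter than 2 characters (a malformed card); there, depending on the
-- short card's position, BOTH programs raise the same IndexError from card[1] or BOTH
-- return False after an earlier rank mismatch (see claim cites).
def Pre_is_bomb (carddict : List (String × Int)) (current_rank : String) : Prop :=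
  carddict.foldl (fun acc kv => acc + kv.2) 0 < 4 ∨
    ∀ kv ∈ carddict, 0 < kv.2 → kv.1 ≠ "H" ++ current_rank → 2 ≤ kv.1.length
instance (carddict : List (String × Int)) (current_rank : String) : Decidable (Pre_is_bomb carddict current_rank) := by unfold Pre_is_bomb; infer_instance

def pvWitness_is_bomb : (List (String × Int)) × String := ([("S3", 4), ("D7", 0)], "3")

def Spec_is_bomb (carddict : List (String × Int)) (current_rank : String) (out : Bool) : Prop := out = is_bomb_alt carddict current_rank
instance (carddict : List (String × Int)) (current_rank : String) (out : Bool) : Decidable (Spec_is_bomb carddict current_rank out) := by unfold Spec_is_bomb; infer_instance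

-- ===== CLAIM (what is proved, stated in full; the proofs are below) =====
def Claim_equal_is_bomb : Prop := ∀ (carddict : List (String × Int)) (current_rank : String), Dom_is_bomb carddict current_rank → Pre_is_bomb carddict current_rank → Spec_is_bomb carddict current_rank (is_bomb carddict current_rank)

-- ===== LEMMAS AND PROOFS =====

-- the keys A's filtered expansion keeps: positive count, not the wildcard
def keep (w : String) (kv : String × Int) : Bool := decide (0 < kv.2) && (kv.1 != w)

-- the final state of A's second loop, for a nonempty card list
theorem bombFold_eq (w : String) (l : List (String × Int)) (a b : List String)
    (hl : l ≠ []) :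
    l.foldl (bombStep w) (a, b) =
      (a ++ l.flatMap (fun kv => List.replicate kv.2.toNat kv.1),
       (a ++ l.flatMap (fun kv => List.replicate kv.2.toNat kv.1)).filter
         (fun c => c != w)) := by
  induction l generalizing a b with
  | nil => cases hl rfl
  | cons kv t ih =>
    by_cases ht : t = []
    · subst ht
      simp [bombStep]
    · simp only [List.foldl_cons, bombStep, List.flatMap_cons, ← List.append_assoc]
      exact ih _ _ ht

-- filtering the expansion by card ≠ wildcard = expanding the kept keys
theorem filter_flatMap_eq (w : String) (l : List (String × Int)) :
    (l.flatMap (fun kv => List.replicate kv.2.toNat kv.1)).filter (fun c => c != w) =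
      (l.filter (keep w)).flatMap (fun kv => List.replicate kv.2.toNat kv.1) := by
  induction l with
  | nil => rfl
  | cons kv t ih =>
    simp only [List.flatMap_cons, List.filter_append, ih, List.filter_cons, keep]
    by_cases hw : kv.1 != w
    · by_cases hp : 0 < kv.2
      · simp [hw, hp]
      · have : kv.2.toNat = 0 := by omega
        simp [hw, hp, this]
    · by_cases hp : 0 < kv.2
      · simp [hw, hp]
      · have : kv.2.toNat = 0 := by omega
        simp [hw, hp, this]

theorem mem_expand_iff (L : List (String × Int)) (hL : ∀ kv ∈ L, keep w kv = true)
    (c : String) :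
    c ∈ L.flatMap (fun kv => List.replicate kv.2.toNat kv.1) ↔ ∃ kv ∈ L, kv.1 = c := by
  simp only [List.mem_flatMap, List.mem_replicate]
  constructor
  · rintro ⟨kv, hkv, _, rfl⟩
    exact ⟨kv, hkv, rfl⟩
  · rintro ⟨kv, hkv, rfl⟩
    have := hL kv hkv
    simp only [keep, Bool.and_eq_true, decide_eq_true_eq] at this
    exact ⟨kv, hkv, by omega, rfl⟩

-- B's loop with the first rank already seen: checks every kept rank equals r
theorem altLoop_some (w : String) (r : Option Char) (l : List (String × Int)) :
    altLoop w (some r) l =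
      (l.filter (keep w)).all (fun kv => decide (PySem.Str.pyGet? kv.1 1 = r)) := by
  induction l with
  | nil => rfl
  | cons kv t ih =>
    by_cases hp1 : 0 < kv.2
    · by_cases hp2 : kv.1 = w
      · simp [altLoop, keep, hp1, hp2, ih]
      · simp only [altLoop, List.filter_cons, keep, hp1, ih]
        simp [hp2]
        rfl
    · simp [altLoop, keep, hp1, ih]

-- B's loop from the start: trivially true if nothing is kept, else all ranks equal the first
theorem altLoop_none (w : String) (l : List (String × Int)) :
    altLoop w none l =
      match l.filter (keep w) with
      | [] => true
      | kv0 :: t =>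
          t.all (fun kv => decide (PySem.Str.pyGet? kv.1 1 = PySem.Str.pyGet? kv0.1 1)) := by
  induction l with
  | nil => rfl
  | cons kv t ih =>
    by_cases hp1 : 0 < kv.2
    · by_cases hp2 : kv.1 = w
      · simp [altLoop, keep, hp1, hp2, ih]
      · simp only [altLoop, List.filter_cons, keep, hp1, altLoop_some]
        simp [hp2]
    · simp [altLoop, keep, hp1, ih]

theorem foldl_sum_nil (l : List (String × Int)) (hl : l = []) :
    l.foldl (fun acc kv => acc + kv.2) 0 = 0 := by subst hl; rfl

theorem ports_agree (carddict : List (String × Int)) (current_rank : String) :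
    is_bomb carddict current_rank = is_bomb_alt carddict current_rank := by
  unfold is_bomb is_bomb_alt
  set s : Int := carddict.foldl (fun acc kv => acc + kv.2) 0 with hs
  by_cases h4 : 4 ≤ s
  · have hlt : ¬ s < 4 := by omega
    simp only [h4, if_true, hlt, if_false]
    set w := "H" ++ current_rank with hw
    have hne : carddict ≠ [] := by
      intro h
      rw [foldl_sum_nil carddict h] at hs
      omega
    rw [bombFold_eq w carddict [] [] hne]
    simp only [List.nil_append, filter_flatMap_eq, altLoop_none]
    set L := carddict.filter (keep w) with hLdef
    have hLall : ∀ kv ∈ L, keep w kv = true := fun kv h => List.of_mem_filter h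
    cases hL : L with
    | nil => simp
    | cons kv0 T =>
      rw [hL] at hLall
      have hkv0 : keep w kv0 = true := hLall kv0 List.mem_cons_self
      have hpos : 0 < kv0.2.toNat := by
        simp only [keep, Bool.and_eq_true, decide_eq_true_eq] at hkv0
        omega
      have hTall : ∀ kv ∈ T, keep w kv = true :=
        fun x hx => hLall x (List.mem_cons_of_mem _ hx)
      -- head of the expansion is kv0.1
      have hexp : (kv0 :: T).flatMap (fun kv => List.replicate kv.2.toNat kv.1) =
          kv0.1 :: (List.replicate (kv0.2.toNat - 1) kv0.1 ++
            T.flatMap (fun kv => List.replicate kv.2.toNat kv.1)) := by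
        rw [List.flatMap_cons]
        cases hn : kv0.2.toNat with
        | zero => omega
        | succ m => simp [List.replicate_succ]
      rw [hexp]
      simp only [List.all_cons, List.all_append, List.all_replicate]
      rw [Bool.eq_iff_iff]
      simp only [Bool.and_eq_true, List.all_eq_true, beq_iff_eq, decide_eq_true_eq]
      constructor
      -- A's check over the multiset ⟹ B's check over the kept keys
      · rintro ⟨-, -, hrest⟩ kv hkv
        have hm : kv.1 ∈ T.flatMap (fun kv => List.replicate kv.2.toNat kv.1) := by
          rw [mem_expand_iff T hTall]
          exact ⟨kv, hkv, rfl⟩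
        exact hrest _ hm
      · intro h
        refine ⟨trivial, by split_ifs <;> simp, fun c hc => ?_⟩
        rw [mem_expand_iff T hTall] at hc
        obtain ⟨kv, hkv, rfl⟩ := hc
        exact h kv hkv
  · have hlt : s < 4 := by omega
    simp only [h4, if_false, hlt, if_true]

-- ===== VERDICT (by name: the statement is the Claim_ definition above) =====
theorem is_bomb_spec : Claim_equal_is_bomb := by
  intro carddict current_rank _ _
  unfold Spec_is_bomb
  exact ports_agree carddict current_rank
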